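-- pv_equiv track=rewrite | github.com/Vishwaksen/Classification-Algorithms | naive_bayes_classification.py | map_descriptor_posterior_probablities
-- ===== SOURCE A (Python) =====
-- def map_descriptor_posterior_probablities(hmap, test_data, train_data, label):
--     counter = 0
--     length = len(test_data)
--     for pos, val in enumerate(test_data):
--         if(pos < length - 1):
--             for p, q in enumerate(train_data):
--                 for i in range(len(q)):
--                     if(i < length - 1):
--                         if((i == pos) and (q[i] == val) and (q[-1] == label)):
--                             if i in hmap:
--                                 hmap[i] = hmap[i] + 1
--                             else:
--                                 hmap[i] = 1
--     return hmap
-- ===== SOURCE B (Python) =====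
-- def map_descriptor_posterior_probablities(hmap, test_data, train_data, label):
--     filtered = [q for q in train_data if len(q) > 0 and q[-1] == label]
--     for pos in range(len(test_data) - 1):
--         count = sum(1 for q in filtered if pos < len(q) and q[pos] == test_data[pos])
--         if count > 0:
--             hmap[pos] = hmap.get(pos, 0) + count
--     return hmap
-- ===== Notes on version B (the rewrite author's own statement) =====
-- stated objective: faster
-- what changed: Replaces A's triple nested loop (which rescans every cell of every train row and re-checks the label per cell, for every test position) by a one-shot label filter of the train rows followed by a single column-wise count per test position, with one dict update per position.
import Mathlib
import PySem

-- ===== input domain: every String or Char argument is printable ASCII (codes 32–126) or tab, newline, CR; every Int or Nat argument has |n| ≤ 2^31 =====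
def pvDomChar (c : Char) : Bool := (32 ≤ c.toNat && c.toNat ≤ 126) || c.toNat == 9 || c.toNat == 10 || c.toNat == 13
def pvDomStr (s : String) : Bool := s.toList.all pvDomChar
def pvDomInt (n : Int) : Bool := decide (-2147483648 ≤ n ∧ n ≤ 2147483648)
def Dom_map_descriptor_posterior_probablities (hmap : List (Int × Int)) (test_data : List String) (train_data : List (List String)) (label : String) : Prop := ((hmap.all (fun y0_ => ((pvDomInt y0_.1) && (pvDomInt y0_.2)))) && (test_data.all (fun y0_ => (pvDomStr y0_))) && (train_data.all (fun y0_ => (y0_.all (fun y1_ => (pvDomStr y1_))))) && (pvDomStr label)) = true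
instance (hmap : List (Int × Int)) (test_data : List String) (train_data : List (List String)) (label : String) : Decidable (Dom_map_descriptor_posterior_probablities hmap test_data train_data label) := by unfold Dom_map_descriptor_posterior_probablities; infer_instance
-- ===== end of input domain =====

-- B replaces A's triple nested loop (with an inline label re-check per cell) by a one-shot label
-- filter followed by a column-wise count per test position (objective: simpler). Both the Python A
-- and the Python B mutate the hmap dict in place and return it; the equivalence proved here is
-- about the return value.

-- ===== PORT A =====
def map_descriptor_posterior_probablities (hmap : List (Int × Int)) (test_data : List String) (train_data : List (List String)) (label : String) : List (Int × Int) :=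
  let length : Int := PySem.List.len test_data
  ((PySem.List.enumerate test_data).foldl (fun d pv =>
      if pv.1 < length - 1 then
        train_data.foldl (fun d q =>
          (PySem.List.pyRange 0 (PySem.List.len q)).foldl (fun d i =>
            if i < length - 1 then
              if (i == pv.1 && PySem.List.pyGetD q i "" == pv.2 && PySem.List.pyGetD q (-1) "" == label) then
                -- q[i] and q[-1] are always in range here (0 ≤ i < len q), so pyGetD is exact
                if d.contains i then d.insert i (d.getD i 0 + 1) else d.insert i 1
              else d
            else d) d) d
      else d) (PySem.Dict.mk hmap)).items

-- ===== PORT B =====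
def map_descriptor_posterior_probablities_alt (hmap : List (Int × Int)) (test_data : List String) (train_data : List (List String)) (label : String) : List (Int × Int) :=
  let filtered := train_data.filter (fun q => decide (0 < PySem.List.len q) && PySem.List.pyGetD q (-1) "" == label)
  ((PySem.List.pyRange 0 (PySem.List.len test_data - 1)).foldl (fun d pos =>
      let count : Int := ((filtered.filter (fun q => decide (pos < PySem.List.len q) && PySem.List.pyGetD q pos "" == PySem.List.pyGetD test_data pos "")).length : Int)
      if 0 < count then d.insert pos (d.getD pos 0 + count) else d) (PySem.Dict.mk hmap)).items

-- ===== PRECONDITION & SPEC =====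
def Spec_map_descriptor_posterior_probablities (hmap : List (Int × Int)) (test_data : List String) (train_data : List (List String)) (label : String) (out : List (Int × Int)) : Prop := out = map_descriptor_posterior_probablities_alt hmap test_data train_data label
instance (hmap : List (Int × Int)) (test_data : List String) (train_data : List (List String)) (label : String) (out : List (Int × Int)) : Decidable (Spec_map_descriptor_posterior_probablities hmap test_data train_data label out) := by unfold Spec_map_descriptor_posterior_probablities; infer_instance

-- ===== CLAIM (what is proved, stated in full; the proofs are below) =====
def Claim_equal_map_descriptor_posterior_probablities : Prop := ∀ (hmap : List (Int × Int)) (test_data : List String) (train_data : List (List String)) (label : String), Dom_map_descriptor_posterior_probablities hmap test_data train_data label → Spec_map_descriptor_posterior_probablities hmap test_data train_data label (map_descriptor_posterior_probablities hmap test_data train_data label)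

-- ===== LEMMAS AND PROOFS =====

-- A fold whose step fires on no element of the list is the identity.
theorem pvFoldlIfId {β : Type} (l : List Int) (c : Int → Bool) (f : β → Int → β) (d : β)
    (h : ∀ i ∈ l, c i = false) :
    l.foldl (fun d i => if c i then f d i else d) d = d := by
  induction l generalizing d with
  | nil => rfl
  | cons x xs ih =>
    have hx := h x (by simp)
    simp only [List.foldl_cons, hx, Bool.false_eq_true, if_false]
    exact ih d (fun i hi => h i (by simp [hi]))

-- A fold over a duplicate-free list whose step can fire only at `pos` applies `f · pos` once or never.
theorem pvFoldlIfSingle {β : Type} (l : List Int) (c : Int → Bool) (pos : Int) (f : β → Int → β) (d : β)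
    (hnd : l.Nodup) (hc : ∀ i, c i = true → i = pos) :
    l.foldl (fun d i => if c i then f d i else d) d
      = if pos ∈ l ∧ c pos = true then f d pos else d := by
  induction l generalizing d with
  | nil => simp
  | cons x xs ih =>
    rcases List.nodup_cons.mp hnd with ⟨hxnot, hndxs⟩
    by_cases hx : c x = true
    · have hxe : x = pos := hc x hx
      subst hxe
      simp only [List.foldl_cons, hx, if_true]
      have : ∀ i ∈ xs, c i = false := by
        intro i hi
        by_contra hci
        have : i = x := hc i (by simpa using hci)
        exact hxnot (this ▸ hi)
      rw [pvFoldlIfId xs c f (f d x) this]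
      simp [List.mem_cons]
    · have hx' : c x = false := by simpa using hx
      simp only [List.foldl_cons, hx', Bool.false_eq_true, if_false]
      rw [ih d hndxs]
      have hiff : (pos ∈ x :: xs ∧ c pos = true) ↔ (pos ∈ xs ∧ c pos = true) := by
        constructor
        · rintro ⟨hm, hcp⟩
          rcases List.mem_cons.mp hm with rfl | hm'
          · exact absurd hcp hx
          · exact ⟨hm', hcp⟩
        · rintro ⟨hm, hcp⟩
          exact ⟨List.mem_cons_of_mem _ hm, hcp⟩
      rw [if_congr hiff rfl rfl]

-- The contains-branch of A is the unconditional overwrite.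
theorem pvUpdEq (d : PySem.Dict Int Int) (i : Int) :
    (if d.contains i then d.insert i (d.getD i 0 + 1) else d.insert i 1)
      = d.insert i (d.getD i 0 + 1) := by
  by_cases h : d.contains i = true
  · simp [h]
  · have hz : d.getD i 0 = 0 := PySem.Dict.getD_of_not_contains d 0 (by simpa using h)
    simp [h, hz]

-- A's innermost loop over one train row: it increments key `pos` once iff the row matches.
theorem pvRowA (L pos : Int) (v label : String) (q : List String) (d : PySem.Dict Int Int)
    (h0 : 0 ≤ pos) (h1 : pos < L - 1) :
    (PySem.List.pyRange 0 (PySem.List.len q)).foldl (fun d i =>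
        if i < L - 1 then
          if (i == pos && PySem.List.pyGetD q i "" == v && PySem.List.pyGetD q (-1) "" == label) then
            if d.contains i then d.insert i (d.getD i 0 + 1) else d.insert i 1
          else d
        else d) d
      = if (decide (pos < PySem.List.len q) && PySem.List.pyGetD q pos "" == v && PySem.List.pyGetD q (-1) "" == label)
          then d.insert pos (d.getD pos 0 + 1) else d := by
  have hcongr : ∀ (acc : PySem.Dict Int Int), ∀ i ∈ PySem.List.pyRange 0 (PySem.List.len q),
      (if i < L - 1 then
          if (i == pos && PySem.List.pyGetD q i "" == v && PySem.List.pyGetD q (-1) "" == label) then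
            if acc.contains i then acc.insert i (acc.getD i 0 + 1) else acc.insert i 1
          else acc
        else acc)
      = (if (decide (i < L - 1) && (i == pos && PySem.List.pyGetD q i "" == v && PySem.List.pyGetD q (-1) "" == label)) then
          (if acc.contains i then acc.insert i (acc.getD i 0 + 1) else acc.insert i 1) else acc) := by
    intro acc i _
    by_cases hi : i < L - 1 <;> simp [hi]
  rw [PySem.List.foldl_congr_mem _ _ _ _ hcongr]
  rw [pvFoldlIfSingle _ _ pos
        (fun acc i => if acc.contains i then acc.insert i (acc.getD i 0 + 1) else acc.insert i 1) d
        (PySem.List.nodup_pyRange_one 0 (PySem.List.len q))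
        (by intro i h; simp only [Bool.and_eq_true, beq_iff_eq, decide_eq_true_eq] at h; exact h.2.1.1)]
  rw [pvUpdEq]
  by_cases hlen : pos < (q.length : Int)
  · simp [PySem.List.mem_pyRange_one, h0, h1, hlen]
  · simp [PySem.List.mem_pyRange_one, hlen]

-- Incrementing key `pos` once per matching row equals one update by the match count (if positive).
theorem pvCountFold (rows : List (List String)) (P : List String → Bool) (pos : Int) (d : PySem.Dict Int Int) :
    rows.foldl (fun d q => if P q then d.insert pos (d.getD pos 0 + 1) else d) d
      = if 0 < ((rows.countP P : Nat) : Int) then d.insert pos (d.getD pos 0 + (rows.countP P : Nat)) else d := by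
  induction rows generalizing d with
  | nil => simp
  | cons q rows ih =>
    by_cases hq : P q = true
    · simp only [List.foldl_cons, hq, if_true, List.countP_cons]
      rw [ih]
      by_cases hn : 0 < ((rows.countP P : Nat) : Int)
      · simp only [hn, if_true]
        rw [PySem.Dict.getD_insert_self, PySem.Dict.insert_insert_self]
        have : (0:Int) < ((rows.countP P + 1 : Nat) : Int) := by push_cast; omega
        simp only [this, if_true]
        congr 1
        push_cast
        ring
      · have h0 : rows.countP P = 0 := by omega
        simp [h0]
    · simp only [List.foldl_cons, hq, List.countP_cons]
      rw [ih]
      simp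

-- The two per-position row predicates agree (for 0 ≤ pos, a row with pos < len is nonempty).
theorem pvPredEq (pos : Int) (v label : String) (h0 : 0 ≤ pos) (q : List String) :
    ((fun q => decide (pos < PySem.List.len q) && PySem.List.pyGetD q pos "" == v) q
      && (fun q => decide (0 < PySem.List.len q) && PySem.List.pyGetD q (-1) "" == label) q)
    = (decide (pos < PySem.List.len q) && PySem.List.pyGetD q pos "" == v && PySem.List.pyGetD q (-1) "" == label) := by
  by_cases hlen : pos < (q.length : Int)
  · have hpos : 0 < q.length := by omega
    by_cases ha : PySem.List.pyGetD q pos "" == v <;>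
      by_cases hb : PySem.List.pyGetD q (-1) "" == label <;>
        simp [hlen, hpos, ha, hb]
  · simp [hlen]

-- The per-position step of A (after enumerate is a map over the index range) equals B's step.
theorem pvStepEq (test_data : List String) (train_data : List (List String)) (label : String)
    (d : PySem.Dict Int Int) (j : Int) (h0 : 0 ≤ j) (h1 : j < PySem.List.len test_data - 1) :
    train_data.foldl (fun d q =>
        (PySem.List.pyRange 0 (PySem.List.len q)).foldl (fun d i =>
          if i < PySem.List.len test_data - 1 then
            if (i == j && PySem.List.pyGetD q i "" == PySem.List.pyGetD test_data j "" && PySem.List.pyGetD q (-1) "" == label) then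
              if d.contains i then d.insert i (d.getD i 0 + 1) else d.insert i 1
            else d
          else d) d) d
      = (let count : Int := (((train_data.filter (fun q => decide (0 < PySem.List.len q) && PySem.List.pyGetD q (-1) "" == label)).filter
            (fun q => decide (j < PySem.List.len q) && PySem.List.pyGetD q j "" == PySem.List.pyGetD test_data j "")).length : Int)
        if 0 < count then d.insert j (d.getD j 0 + count) else d) := by
  have hrows : ∀ (acc : PySem.Dict Int Int), ∀ q ∈ train_data,
      (PySem.List.pyRange 0 (PySem.List.len q)).foldl (fun d i =>
          if i < PySem.List.len test_data - 1 then
            if (i == j && PySem.List.pyGetD q i "" == PySem.List.pyGetD test_data j "" && PySem.List.pyGetD q (-1) "" == label) then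
              if d.contains i then d.insert i (d.getD i 0 + 1) else d.insert i 1
            else d
          else d) acc
      = (if (decide (j < PySem.List.len q) && PySem.List.pyGetD q j "" == PySem.List.pyGetD test_data j "" && PySem.List.pyGetD q (-1) "" == label)
          then acc.insert j (acc.getD j 0 + 1) else acc) := by
    intro acc q _
    exact pvRowA (PySem.List.len test_data) j (PySem.List.pyGetD test_data j "") label q acc h0 h1
  rw [PySem.List.foldl_congr_mem _ _ _ _ hrows]
  rw [pvCountFold]
  simp only [List.filter_filter, ← List.countP_eq_length_filter]
  have : train_data.countP (fun q => decide (j < PySem.List.len q) && PySem.List.pyGetD q j "" == PySem.List.pyGetD test_data j ""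
            && (decide (0 < PySem.List.len q) && PySem.List.pyGetD q (-1) "" == label))
       = train_data.countP (fun q => decide (j < PySem.List.len q) && PySem.List.pyGetD q j "" == PySem.List.pyGetD test_data j "" && PySem.List.pyGetD q (-1) "" == label) := by
    apply List.countP_congr
    intro q _
    have := pvPredEq j (PySem.List.pyGetD test_data j "") label h0 q
    simp only at this
    constructor <;> intro h
    · rw [← this]; simp only [Bool.and_eq_true] at h ⊢; tauto
    · rw [← this] at h; simp only [Bool.and_eq_true] at h ⊢; tauto
  rw [this]

-- ===== VERDICT (by name: the statement is the Claim_ definition above) =====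
theorem map_descriptor_posterior_probablities_spec : Claim_equal_map_descriptor_posterior_probablities := by
  intro hmap test_data train_data label _
  unfold Spec_map_descriptor_posterior_probablities
  unfold map_descriptor_posterior_probablities map_descriptor_posterior_probablities_alt
  simp only []
  congr 1
  rw [PySem.List.enumerate_eq_map_pyRange test_data "", List.foldl_map]
  by_cases hL : PySem.List.len test_data = 0
  · have e1 : PySem.List.pyRange 0 (PySem.List.len test_data) = [] :=
      PySem.List.pyRange_one_eq_nil (by omega)
    have e2 : PySem.List.pyRange 0 (PySem.List.len test_data - 1) = [] :=
      PySem.List.pyRange_one_eq_nil (by omega)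
    rw [e1, e2]
    rfl
  · have h1 : (1:Int) ≤ PySem.List.len test_data := by
      have : (0:Int) ≤ PySem.List.len test_data := by simp [PySem.List.len]
      omega
    rw [PySem.List.pyRange_one_append 0 (PySem.List.len test_data - 1) (PySem.List.len test_data) (by omega) (by omega)]
    rw [List.foldl_append]
    have htail : PySem.List.pyRange (PySem.List.len test_data - 1) (PySem.List.len test_data)
        = [PySem.List.len test_data - 1] := by
      have := PySem.List.pyRange_one_singleton (PySem.List.len test_data - 1)
      rw [← this]; congr 1; omega
    rw [htail]
    simp only [List.foldl_cons, List.foldl_nil, lt_irrefl, if_false]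
    apply PySem.List.foldl_congr_mem
    intro acc j hj
    rcases PySem.List.mem_pyRange_one.mp hj with ⟨hj0, hj1⟩
    simp only [hj1, if_true]
    exact pvStepEq test_data train_data label acc j hj0 hj1
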